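-- pv_equiv track=rewrite | github.com/JakeHuneau/ProjectEuler | PE37.py | get_all_truncs
-- ===== SOURCE A (Python) =====
-- def get_all_truncs(n):
--     truncs = {n}
--     str_n = [i for i in str(n)]
--     for i in range(1, len(str_n)):
--         trunc_f = str_n[i:]
--         trunc_b = str_n[:i]
--         trunc_f_int = int(''.join(trunc_f))
--         trunc_b_int = int(''.join(trunc_b))
--         truncs.add(trunc_b_int)
--         truncs.add(trunc_f_int)
--     return truncs
-- ===== SOURCE B (Python) =====
-- def get_all_truncs(n):
--     truncs = {n}
--     p = 10
--     while p * 10 <= n: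
--         p *= 10
--     while 10 <= p <= n:
--         truncs.add(n // p)
--         truncs.add(n % p)
--         p //= 10
--     return truncs
-- ===== Notes on version B (the rewrite author's own statement) =====
-- stated objective: simpler
-- what changed: replaces the str/slice/join/int round-trips with pure integer arithmetic: one loop finds the largest power of ten not exceeding n, a second loop adds n//p and n%p while shrinking the power, so no strings are built at all
import Mathlib
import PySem

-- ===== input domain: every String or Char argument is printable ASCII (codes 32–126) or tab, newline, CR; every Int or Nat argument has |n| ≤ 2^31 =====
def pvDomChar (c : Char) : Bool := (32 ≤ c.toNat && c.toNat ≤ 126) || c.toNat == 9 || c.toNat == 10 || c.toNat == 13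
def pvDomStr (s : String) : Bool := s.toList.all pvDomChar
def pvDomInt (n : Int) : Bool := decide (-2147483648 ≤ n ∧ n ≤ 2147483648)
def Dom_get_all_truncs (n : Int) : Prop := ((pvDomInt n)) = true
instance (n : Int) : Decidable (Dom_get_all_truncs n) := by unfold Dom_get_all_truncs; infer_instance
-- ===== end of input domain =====

-- B replaces A's string/slice/join/int round-trips with pure integer arithmetic on powers of ten (objective: simpler).

-- ===== PORT A =====
-- int(''.join(cs)): hand port, exact for the nonempty ASCII-digit lists this function feeds it under
-- Pre_ (0 ≤ n).  PySem.Int.ofChars? computes the same value on such lists, but its digit-parser core is a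
-- private definition that proofs cannot name, so the digit-only case A reaches is transliterated directly.
def pvIntOfDigits (cs : List Char) : Int :=
  cs.foldl (fun a c => a * 10 + ((c.toNat : Int) - 48)) 0

def get_all_truncs (n : Int) : List Int :=
  let truncs : PySem.Set Int := PySem.Set.ofList [n]
  let str_n : List Char := PySem.Int.toChars n
  (PySem.List.pyRange 1 (PySem.List.len str_n) 1).foldl
    (fun truncs i =>
      let trunc_f := PySem.List.slice str_n (some i) none
      let trunc_b := PySem.List.slice str_n none (some i)
      let trunc_f_int := pvIntOfDigits trunc_f
      let trunc_b_int := pvIntOfDigits trunc_b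
      let truncs := PySem.Set.add truncs trunc_b_int
      PySem.Set.add truncs trunc_f_int)
    truncs

-- ===== PORT B =====
-- while p * 10 <= n: p *= 10
def pvPowBelow (n p : Int) (hp : 0 < p) : Int :=
  if p * 10 ≤ n then pvPowBelow n (p * 10) (by positivity) else p
termination_by (n - p).toNat
decreasing_by omega

-- while 10 <= p <= n: truncs.add(n // p); truncs.add(n % p); p //= 10
def pvLoop2 (n p : Int) (truncs : PySem.Set Int) : List Int :=
  if 10 ≤ p ∧ p ≤ n then
    pvLoop2 n (PySem.Int.floordiv p 10)
      (PySem.Set.add (PySem.Set.add truncs (PySem.Int.floordiv n p)) (PySem.Int.mod n p))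
  else truncs
termination_by p.toNat
decreasing_by
  rw [PySem.Int.floordiv_eq_ediv_of_pos (by norm_num)]
  omega

def get_all_truncs_alt (n : Int) : List Int :=
  let truncs : PySem.Set Int := PySem.Set.ofList [n]
  pvLoop2 n (pvPowBelow n 10 (by norm_num)) truncs

-- ===== PRECONDITION & SPEC =====
-- Pre_ excludes exactly the negative n, on which Python A raises ValueError (int() of the sign-only slice '-').
def Pre_get_all_truncs (n : Int) : Prop := 0 ≤ n
instance (n : Int) : Decidable (Pre_get_all_truncs n) := by unfold Pre_get_all_truncs; infer_instance
def pvWitness_get_all_truncs : Int := 1270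

def Spec_get_all_truncs (n : Int) (out : List Int) : Prop := out = get_all_truncs_alt n
instance (n : Int) (out : List Int) : Decidable (Spec_get_all_truncs n out) := by unfold Spec_get_all_truncs; infer_instance

-- ===== CLAIM (what is proved, stated in full; the proofs are below) =====
def Claim_equal_get_all_truncs : Prop := ∀ (n : Int), Dom_get_all_truncs n → Pre_get_all_truncs n → Spec_get_all_truncs n (get_all_truncs n)

-- ===== LEMMAS AND PROOFS =====

-- decimal value of a digit character / of a big-endian digit list
def pvDval (c : Char) : Nat := c.toNat - 48
def pvVal (cs : List Char) : Nat := cs.foldl (fun a c => a * 10 + pvDval c) 0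

theorem pvVal_acc (cs : List Char) : ∀ a : Nat,
    cs.foldl (fun a c => a * 10 + pvDval c) a = a * 10 ^ cs.length + pvVal cs := by
  induction cs with
  | nil => intro a; simp [pvVal]
  | cons c cs ih =>
    intro a
    simp only [List.foldl_cons, List.length_cons, pvVal] at *
    rw [ih (a * 10 + pvDval c), ih (0 * 10 + pvDval c)]
    ring

theorem pvVal_append (xs ys : List Char) :
    pvVal (xs ++ ys) = pvVal xs * 10 ^ ys.length + pvVal ys := by
  simp only [pvVal, List.foldl_append]
  rw [pvVal_acc]
  rfl

theorem pvVal_lt (cs : List Char) (h : ∀ c ∈ cs, pvDval c < 10) :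
    pvVal cs < 10 ^ cs.length := by
  induction cs with
  | nil => simp [pvVal]
  | cons c cs ih =>
    have h1 : pvDval c < 10 := h c (by simp)
    have h2 := ih (fun c hc => h c (by simp [hc]))
    have hv : pvVal (c :: cs) = pvDval c * 10 ^ cs.length + pvVal cs := by
      simp only [pvVal, List.foldl_cons]
      rw [pvVal_acc]
      simp only [pvVal]
      ring
    rw [hv]
    simp only [List.length_cons, pow_succ]
    nlinarith

theorem pvIntOfDigits_eq (cs : List Char) (h : ∀ c ∈ cs, 48 ≤ c.toNat) :
    pvIntOfDigits cs = (pvVal cs : Int) := by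
  suffices H : ∀ (cs : List Char) (a : Nat), (∀ c ∈ cs, 48 ≤ c.toNat) →
      cs.foldl (fun a c => a * 10 + ((c.toNat : Int) - 48)) (a : Int)
        = ((cs.foldl (fun a c => a * 10 + pvDval c) a : Nat) : Int) by
    simpa [pvIntOfDigits, pvVal] using H cs 0 h
  intro cs
  induction cs with
  | nil => intro a _; simp
  | cons c cs ih =>
    intro a hd
    have hc : 48 ≤ c.toNat := hd c (by simp)
    simp only [List.foldl_cons]
    have he : (a : Int) * 10 + ((c.toNat : Int) - 48) = ((a * 10 + pvDval c : Nat) : Int) := by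
      unfold pvDval; push_cast; omega
    rw [he, ih _ (fun c hc => hd c (by simp [hc]))]

theorem pvDigitChar_facts (r : Nat) (h : r < 10) :
    pvDval (Nat.digitChar r) = r ∧ 48 ≤ (Nat.digitChar r).toNat := by
  interval_cases r <;> simp [pvDval, Nat.digitChar]

theorem pvToDigits_digit (m : Nat) (c : Char) (hc : c ∈ Nat.toDigits 10 m) :
    48 ≤ c.toNat ∧ pvDval c < 10 := by
  have h := Nat.isDigit_of_mem_toDigits (b := 10) (by norm_num) (by norm_num) hc
  simp [Char.isDigit] at h
  obtain ⟨h1, h2⟩ := h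
  rw [UInt32.le_iff_toNat_le] at h1 h2
  rw [show (48:UInt32).toNat = 48 from rfl] at h1
  rw [show (57:UInt32).toNat = 57 from rfl] at h2
  unfold pvDval
  rw [show c.toNat = c.val.toNat from rfl]
  omega

theorem pvVal_toDigits (m : Nat) : pvVal (Nat.toDigits 10 m) = m := by
  induction m using Nat.strong_induction_on with
  | _ m ih =>
    rw [Nat.toDigits_eq_if (by norm_num)]
    by_cases h : m < 10
    · rw [if_pos h]
      have := (pvDigitChar_facts m h).1
      simp [pvVal, this]
    · rw [if_neg h]
      rw [pvVal_append]
      have h10 : m / 10 < m := Nat.div_lt_self (by omega) (by norm_num)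
      rw [ih _ h10]
      have := (pvDigitChar_facts (m % 10) (Nat.mod_lt _ (by norm_num))).1
      simp [pvVal, this]
      omega

theorem pvToDigits_bounds (m : Nat) (hm : 1 ≤ m) :
    10 ^ ((Nat.toDigits 10 m).length - 1) ≤ m ∧ m < 10 ^ (Nat.toDigits 10 m).length := by
  induction m using Nat.strong_induction_on with
  | _ m ih =>
    rw [Nat.toDigits_eq_if (by norm_num)]
    by_cases h : m < 10
    · rw [if_pos h]; simpa using ⟨hm, h⟩
    · rw [if_neg h]
      have h10 : m / 10 < m := Nat.div_lt_self (by omega) (by norm_num)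
      have hm10 : 1 ≤ m / 10 := by omega
      obtain ⟨lo, hi⟩ := ih _ h10 hm10
      have hlen : 1 ≤ (Nat.toDigits 10 (m / 10)).length := Nat.length_toDigits_pos
      set L := (Nat.toDigits 10 (m / 10)).length with hL
      have hPQ : 10 ^ L = 10 ^ (L - 1) * 10 := by
        rw [← pow_succ]; congr 1; omega
      constructor
      · simp only [List.length_append, List.length_cons, List.length_nil]
        have he : L + 1 - 1 = (L - 1) + 1 := by omega
        rw [he, pow_succ]
        have := Nat.div_mul_le_self m 10
        set Q := 10 ^ (L - 1)
        omega
      · simp only [List.length_append, List.length_cons, List.length_nil, pow_succ]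
        set P := 10 ^ L
        omega

theorem pvVal_take_drop (m k : Nat) (_hk : k ≤ (Nat.toDigits 10 m).length) :
    pvVal ((Nat.toDigits 10 m).take k) = m / 10 ^ ((Nat.toDigits 10 m).length - k)
    ∧ pvVal ((Nat.toDigits 10 m).drop k) = m % 10 ^ ((Nat.toDigits 10 m).length - k) := by
  set ds := Nat.toDigits 10 m with hds
  have hsplit : ds.take k ++ ds.drop k = ds := List.take_append_drop k ds
  have hlen : (ds.drop k).length = ds.length - k := by simp
  have hv : pvVal (ds.take k) * 10 ^ (ds.length - k) + pvVal (ds.drop k) = m := by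
    rw [← hlen, ← pvVal_append, hsplit, hds, pvVal_toDigits]
  have hr : pvVal (ds.drop k) < 10 ^ (ds.length - k) := by
    rw [← hlen]
    exact pvVal_lt _ (fun c hc => (pvToDigits_digit m c (List.mem_of_mem_drop hc)).2)
  have := (Nat.div_mod_unique (b := 10 ^ (ds.length - k)) (a := m)
      (d := pvVal (ds.take k)) (c := pvVal (ds.drop k)) (by positivity)).mpr
      ⟨by rw [Nat.mul_comm]; linarith [hv], hr⟩
  exact ⟨this.1.symm, this.2.symm⟩

-- the common intermediate: add m/10^e and m%10^e, then exponent e-1, … down to 1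
def pvAddTruncs (m : Nat) : Nat → PySem.Set Int → List Int
  | 0, s => s
  | e+1, s => pvAddTruncs m e
      (PySem.Set.add (PySem.Set.add s ((m / 10 ^ (e+1) : Nat) : Int)) ((m % 10 ^ (e+1) : Nat) : Int))

theorem pvA_eq_addTruncs (m : Nat) (L : Nat) (hL : L = (Nat.toDigits 10 m).length) :
    ∀ (j : Nat) (a : Nat) (ia : Int) (s : PySem.Set Int), ia = (a : Int) → a + j = L → 1 ≤ a →
    (PySem.List.pyRange ia (L : Int) 1).foldl
      (fun truncs i =>
        PySem.Set.add
          (PySem.Set.add truncs (pvIntOfDigits (PySem.List.slice (Nat.toDigits 10 m) none (some i))))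
          (pvIntOfDigits (PySem.List.slice (Nat.toDigits 10 m) (some i) none))) s
      = pvAddTruncs m j s := by
  intro j
  induction j with
  | zero =>
    intro a ia s hia ha h1
    subst hia
    rw [PySem.List.pyRange_one_eq_nil (by omega)]
    simp [pvAddTruncs]
  | succ j ih =>
    intro a ia s hia ha h1
    subst hia
    rw [PySem.List.pyRange_one_cons (by exact_mod_cast (by omega : (a : Int) < (L : Int)))]
    simp only [List.foldl_cons]
    have hset : (((a : Nat) : Int) + 1) = (((a + 1 : Nat)) : Int) := by push_cast; ring
    rw [hset, ih (a + 1) _ _ rfl (by omega) (by omega)]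
    -- identify the two added values
    have hka : a ≤ (Nat.toDigits 10 m).length := by omega
    have hdig : ∀ c ∈ Nat.toDigits 10 m, 48 ≤ c.toNat := fun c hc => (pvToDigits_digit m c hc).1
    have htake : pvIntOfDigits (PySem.List.slice (Nat.toDigits 10 m) none (some (a : Int)))
        = ((m / 10 ^ (j + 1) : Nat) : Int) := by
      rw [PySem.List.slice_to_natCast]
      rw [pvIntOfDigits_eq _ (fun c hc => hdig c (List.mem_of_mem_take hc))]
      rw [(pvVal_take_drop m a hka).1,
        show (Nat.toDigits 10 m).length - a = j + 1 from by omega]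
    have hdrop : pvIntOfDigits (PySem.List.slice (Nat.toDigits 10 m) (some (a : Int)) none)
        = ((m % 10 ^ (j + 1) : Nat) : Int) := by
      rw [PySem.List.slice_from_natCast]
      rw [pvIntOfDigits_eq _ (fun c hc => hdig c (List.mem_of_mem_drop hc))]
      rw [(pvVal_take_drop m a hka).2,
        show (Nat.toDigits 10 m).length - a = j + 1 from by omega]
    simp only [pvAddTruncs]
    rw [htake, hdrop]

theorem pvLoop2_eq_addTruncs (m : Nat) :
    ∀ (e : Nat) (s : PySem.Set Int), 1 ≤ e → (10:Int) ^ e ≤ (m : Int) →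
    pvLoop2 (m : Int) ((10:Int) ^ e) s = pvAddTruncs m e s := by
  intro e
  induction e with
  | zero => intro s h; omega
  | succ e ih =>
    intro s _ hle
    have h10le : (10:Int) ≤ 10 ^ (e + 1) := by
      calc (10:Int) = 10 ^ 1 := (pow_one 10).symm
      _ ≤ 10 ^ (e + 1) := pow_le_pow_right₀ (by norm_num) (by omega)
    have hstep : (10:Int) ^ e ≤ 10 ^ (e + 1) :=
      pow_le_pow_right₀ (by norm_num) (by omega)
    rw [pvLoop2]
    rw [if_pos ⟨h10le, hle⟩]
    have hdivp : PySem.Int.floordiv ((10:Int) ^ (e + 1)) 10 = (10:Int) ^ e := by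
      rw [PySem.Int.floordiv_eq_ediv_of_pos (by norm_num), pow_succ]
      exact Int.mul_ediv_cancel _ (by norm_num)
    have hdiv : PySem.Int.floordiv ((m : Int)) ((10:Int) ^ (e + 1)) = ((m / 10 ^ (e+1) : Nat) : Int) := by
      rw [PySem.Int.floordiv_eq_ediv_of_pos (by positivity)]
      rw [show ((10:Int) ^ (e+1)) = ((10 ^ (e+1) : Nat) : Int) from by push_cast; ring]
      rw [← Int.natCast_ediv]
    have hmod : PySem.Int.mod ((m : Int)) ((10:Int) ^ (e + 1)) = ((m % 10 ^ (e+1) : Nat) : Int) := by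
      rw [PySem.Int.mod_eq_emod_of_pos (by positivity)]
      rw [show ((10:Int) ^ (e+1)) = ((10 ^ (e+1) : Nat) : Int) from by push_cast; ring]
      rw [← Int.natCast_emod]
    rw [hdivp, hdiv, hmod]
    by_cases he : 1 ≤ e
    · rw [ih _ he (le_trans hstep hle)]
      simp [pvAddTruncs]
    · have he0 : e = 0 := by omega
      subst he0
      rw [pvLoop2]
      rw [if_neg (by norm_num)]
      simp [pvAddTruncs]

theorem pvPowBelow_spec (n : Int) :
    ∀ (p : Int) (hp : 0 < p),
    ∃ t : Nat, pvPowBelow n p hp = p * 10 ^ t ∧ n < pvPowBelow n p hp * 10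
      ∧ (p ≤ n → pvPowBelow n p hp ≤ n) := by
  intro p hp
  induction p, hp using pvPowBelow.induct n with
  | case1 p hp hle ih =>
    rw [pvPowBelow, if_pos hle]
    obtain ⟨t, h1, h2, h3⟩ := ih
    refine ⟨t + 1, ?_, ?_, ?_⟩
    · rw [h1]; ring
    · exact h2
    · intro _; exact h3 hle
  | case2 p hp hle =>
    rw [pvPowBelow, if_neg hle]
    exact ⟨0, by ring, by omega, fun h => h⟩

-- small-n case: both programs return [n]
theorem pv_small (n : Int) (h0 : 0 ≤ n) (h9 : n < 10) :
    get_all_truncs n = [n] ∧ get_all_truncs_alt n = [n] := by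
  constructor
  · unfold get_all_truncs
    have hnn : ¬ n < 0 := by omega
    have hds : PySem.Int.toChars n = [Nat.digitChar n.toNat] := by
      simp only [PySem.Int.toChars, if_neg hnn]
      exact Nat.toDigits_of_lt_base (by omega)
    rw [hds]
    simp only [PySem.List.len_eq, List.length_cons, List.length_nil]
    rw [show ((1:Nat) : Int) = 1 by norm_num, PySem.List.pyRange_one_eq_nil (by norm_num)]
    simp [PySem.Set.ofList]
  · unfold get_all_truncs_alt
    rw [pvPowBelow, if_neg (by omega)]
    rw [pvLoop2, if_neg (by omega)]
    simp [PySem.Set.ofList]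

-- ===== VERDICT (by name: the statement is the Claim_ definition above) =====
theorem get_all_truncs_spec : Claim_equal_get_all_truncs := by
  unfold Claim_equal_get_all_truncs
  intro n _ hpre
  unfold Pre_get_all_truncs at hpre
  unfold Spec_get_all_truncs
  by_cases hsmall : n < 10
  · obtain ⟨ha, hb⟩ := pv_small n hpre hsmall
    rw [ha, hb]
  · -- main case: n ≥ 10
    rw [Int.not_lt] at hsmall
    set m := n.toNat with hm
    have hn : n = (m : Int) := by omega
    have hm10 : 10 ≤ m := by omega
    set L := (Nat.toDigits 10 m).length with hL
    obtain ⟨lo, hi⟩ := pvToDigits_bounds m (by omega)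
    rw [← hL] at lo hi
    have hL2 : 2 ≤ L := by
      rcases Nat.lt_or_ge L 2 with hc | hc
      · exfalso
        have hple : (10:Nat) ^ L ≤ 10 := by interval_cases L <;> norm_num
        omega
      · exact hc
    -- A side
    have hA : get_all_truncs n = pvAddTruncs m (L - 1) (PySem.Set.ofList [n]) := by
      have hnn : ¬ n < 0 := by omega
      have hds : PySem.Int.toChars n = Nat.toDigits 10 m := by
        simp only [PySem.Int.toChars, if_neg hnn, hm]
      simp only [get_all_truncs, hds, PySem.List.len_eq]
      rw [show ((Nat.toDigits 10 m).length : Int) = ((L : Nat) : Int) from by rw [hL]]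
      rw [pvA_eq_addTruncs m L hL (L - 1) 1 1 _ (by norm_num) (by omega) (by omega)]
    -- B side
    have hB : get_all_truncs_alt n = pvAddTruncs m (L - 1) (PySem.Set.ofList [n]) := by
      unfold get_all_truncs_alt
      obtain ⟨t, h1, h2, h3⟩ := pvPowBelow_spec n 10 (by norm_num)
      have hple := h3 (by omega)
      -- pvPowBelow n 10 = 10^(t+1) with 10^(t+1) ≤ n < 10^(t+2)
      have hpow : pvPowBelow n 10 (by norm_num) = (10:Int) ^ (t + 1) := by
        rw [h1]; ring
      have ht : t + 1 = L - 1 := by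
        by_contra hne
        have hlo' : ((10:Int)) ^ (L - 1) ≤ (m : Int) := by exact_mod_cast lo
        have hhi' : ((m : Int)) < 10 ^ L := by exact_mod_cast hi
        rcases Nat.lt_or_ge (t + 1) (L - 1) with hlt | hge
        · have : ((10:Int)) ^ (t + 2) ≤ 10 ^ (L - 1) := by
            apply pow_le_pow_right₀ <;> omega
          rw [hpow] at h2
          have : n < (10:Int) ^ (L - 1) := by
            calc n < 10 ^ (t+1) * 10 := h2
            _ = 10 ^ (t + 2) := by ring
            _ ≤ 10 ^ (L - 1) := this
          omega
        · have hgt : L - 1 < t + 1 := by omega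
          have : ((10:Int)) ^ L ≤ 10 ^ (t + 1) := by
            apply pow_le_pow_right₀ <;> omega
          rw [hpow] at hple
          have : ((10:Int)) ^ L ≤ n := le_trans this hple
          omega
      rw [hpow, ht, hn]
      exact pvLoop2_eq_addTruncs m (L - 1) _ (by omega)
        (by rw [← hn, ← ht]; rw [hpow] at hple; exact hple)
    rw [hA, hB]
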